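-- pv_equiv track=rewrite | github.com/Avash-Banerjee/-magenxx | services/rule_engine.py | _primary_goal
-- ===== SOURCE A (Python) =====
-- def _primary_goal(goals):
--     """Return the dominant goal string."""
--     if not goals:
--         return "general_fitness"
--     for g in goals:
--         if g in ("muscle_gain", "bulking", "gain_weight"):
--             return "muscle_gain"
--     for g in goals:
--         if g in ("fat_loss", "weight_loss", "cutting", "lose_weight"):
--             return "fat_loss"
--     return "general_fitness"
-- ===== SOURCE B (Python) =====
-- TIER = {
--     "muscle_gain": 1, "bulking": 1, "gain_weight": 1,
--     "fat_loss": 2, "weight_loss": 2, "cutting": 2, "lose_weight": 2,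
-- }
--
-- def _primary_goal(goals):
--     """Return the dominant goal string (single table-driven pass)."""
--     best = 3
--     for g in goals:
--         t = TIER.get(g, 3)
--         if t == 1:
--             return "muscle_gain"
--         if t < best:
--             best = t
--     return "fat_loss" if best == 2 else "general_fitness"
-- ===== Notes on version B (the rewrite author's own statement) =====
-- stated objective: simpler
-- what changed: Replaced two sequential membership scans with one table-driven pass that looks up each goal's priority tier in a dict and tracks the minimum tier, early-returning on tier 1.
import Mathlib
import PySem

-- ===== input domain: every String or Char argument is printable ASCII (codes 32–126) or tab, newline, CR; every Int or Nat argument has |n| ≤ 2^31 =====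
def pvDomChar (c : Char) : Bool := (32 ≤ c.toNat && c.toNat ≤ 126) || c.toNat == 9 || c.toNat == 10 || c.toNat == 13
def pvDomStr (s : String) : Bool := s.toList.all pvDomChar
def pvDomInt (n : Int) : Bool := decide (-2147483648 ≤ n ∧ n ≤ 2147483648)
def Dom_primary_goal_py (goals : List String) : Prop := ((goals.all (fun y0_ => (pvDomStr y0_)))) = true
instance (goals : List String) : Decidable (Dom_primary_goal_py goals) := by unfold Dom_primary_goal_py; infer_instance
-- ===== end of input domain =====

-- B: one table-driven pass tracking the minimum priority tier, instead of A's two sequential membership scans; objective: simpler.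
-- ===== PORT A =====
-- first loop: return "muscle_gain" on the first gain-type goal
def pvLoop1 : List String → Option String
  | [] => none
  | g :: gs =>
    if g = "muscle_gain" ∨ g = "bulking" ∨ g = "gain_weight" then some "muscle_gain"
    else pvLoop1 gs

-- second loop: return "fat_loss" on the first loss-type goal
def pvLoop2 : List String → Option String
  | [] => none
  | g :: gs =>
    if g = "fat_loss" ∨ g = "weight_loss" ∨ g = "cutting" ∨ g = "lose_weight" then some "fat_loss"
    else pvLoop2 gs

def primary_goal_py (goals : List String) : String :=
  if goals = [] then "general_fitness"
  else
    match pvLoop1 goals with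
    | some r => r
    | none =>
      match pvLoop2 goals with
      | some r => r
      | none => "general_fitness"

-- ===== PORT B =====
def pvTIER : PySem.Dict String Int :=
  PySem.Dict.ofList [("muscle_gain", 1), ("bulking", 1), ("gain_weight", 1),
    ("fat_loss", 2), ("weight_loss", 2), ("cutting", 2), ("lose_weight", 2)]

-- Source B's for-loop with early return, threading the accumulator `best`
def pvAltLoop : List String → Int → String
  | [], best => if best = 2 then "fat_loss" else "general_fitness"
  | g :: gs, best =>
    let t := pvTIER.getD g 3
    if t = 1 then "muscle_gain"
    else pvAltLoop gs (if t < best then t else best)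

def primary_goal_py_alt (goals : List String) : String :=
  pvAltLoop goals 3

-- ===== PRECONDITION & SPEC =====
def Spec_primary_goal_py (goals : List String) (out : String) : Prop := out = primary_goal_py_alt goals
instance (goals : List String) (out : String) : Decidable (Spec_primary_goal_py goals out) := by unfold Spec_primary_goal_py; infer_instance

-- ===== CLAIM (what is proved, stated in full; the proofs are below) =====
def Claim_equal_primary_goal_py : Prop := ∀ (goals : List String), Dom_primary_goal_py goals → Spec_primary_goal_py goals (primary_goal_py goals)

-- ===== LEMMAS AND PROOFS =====

-- ===== VERDICT (by name: the statement is the Claim_ definition above) =====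
-- tier-1 / tier-2 predicates used by the characterisations
def pvC1 (g : String) : Bool := g == "muscle_gain" || g == "bulking" || g == "gain_weight"
def pvC2 (g : String) : Bool := g == "fat_loss" || g == "weight_loss" || g == "cutting" || g == "lose_weight"

theorem pvTier_eq (g : String) :
    pvTIER.getD g 3 = if pvC1 g = true then 1 else if pvC2 g = true then 2 else 3 := by
  by_cases h1 : g = "muscle_gain"
  · subst h1; decide
  by_cases h2 : g = "bulking"
  · subst h2; decide
  by_cases h3 : g = "gain_weight"
  · subst h3; decide
  by_cases h4 : g = "fat_loss"
  · subst h4; decide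
  by_cases h5 : g = "weight_loss"
  · subst h5; decide
  by_cases h6 : g = "cutting"
  · subst h6; decide
  by_cases h7 : g = "lose_weight"
  · subst h7; decide
  simp [pvTIER, PySem.Dict.ofList, PySem.Dict.update, List.foldl,
    PySem.Dict.getD_insert, PySem.Dict.getD_empty, pvC1, pvC2,
    h1, h2, h3, h4, h5, h6, h7]

theorem pvC1_iff (g : String) :
    pvC1 g = true ↔ (g = "muscle_gain" ∨ g = "bulking" ∨ g = "gain_weight") := by
  simp [pvC1, or_assoc]

theorem pvC2_iff (g : String) :
    pvC2 g = true ↔ (g = "fat_loss" ∨ g = "weight_loss" ∨ g = "cutting" ∨ g = "lose_weight") := by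
  simp [pvC2, or_assoc]

theorem pvLoop1_eq (gs : List String) :
    pvLoop1 gs = if ∃ g ∈ gs, pvC1 g = true = true then some "muscle_gain" else none := by
  induction gs with
  | nil => simp [pvLoop1]
  | cons g gs ih =>
    simp only [pvLoop1, ih, pvC1_iff, List.exists_mem_cons_iff]
    by_cases h : g = "muscle_gain" ∨ g = "bulking" ∨ g = "gain_weight" <;> simp [h]

theorem pvLoop2_eq (gs : List String) :
    pvLoop2 gs = if ∃ g ∈ gs, pvC2 g = true = true then some "fat_loss" else none := by
  induction gs with
  | nil => simp [pvLoop2]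
  | cons g gs ih =>
    simp only [pvLoop2, ih, pvC2_iff, List.exists_mem_cons_iff]
    by_cases h : g = "fat_loss" ∨ g = "weight_loss" ∨ g = "cutting" ∨ g = "lose_weight" <;>
      simp [h]

theorem pvAltLoop_eq (gs : List String) (best : Int) (hb : best = 2 ∨ best = 3) :
    pvAltLoop gs best =
      if ∃ g ∈ gs, pvC1 g = true = true then "muscle_gain"
      else if (∃ g ∈ gs, pvC2 g = true) ∨ best = 2 then "fat_loss"
      else "general_fitness" := by
  induction gs generalizing best with
  | nil =>
    rcases hb with h | h <;> simp [pvAltLoop, h]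
  | cons g gs ih =>
    simp only [pvAltLoop, pvTier_eq g]
    by_cases h1 : pvC1 g = true
    · simp [h1]
    · by_cases h2 : pvC2 g = true <;>
        rcases hb with h | h <;> subst h <;>
          simp [h1, h2, ih 2 (Or.inl rfl), ih 3 (Or.inr rfl)]

theorem primary_goal_py_spec : Claim_equal_primary_goal_py := by
  intro goals _
  unfold Spec_primary_goal_py primary_goal_py primary_goal_py_alt
  rw [pvLoop1_eq, pvLoop2_eq, pvAltLoop_eq goals 3 (Or.inr rfl)]
  by_cases hE : goals = []
  · subst hE; simp
  · by_cases h1 : ∃ g ∈ goals, pvC1 g = true <;> by_cases h2 : ∃ g ∈ goals, pvC2 g = true <;>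
      simp [hE, h1, h2]
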